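-- pv_equiv track=rewrite | github.com/gino2013/LucianLeetcodeDaily | solutions/2025-08-05/3477.py | basketsToRemove
-- ===== SOURCE A (Python) =====
-- from typing import List
--
-- def basketsToRemove(fruits: List[int], baskets: List[int]) -> int:
--     # 記錄已使用的籃子 / Track used baskets
--     used_baskets = [False] * len(baskets)
--     unplaced_count = 0
--
--     # 遍歷每種水果 / Iterate through each fruit type
--     for fruit_quantity in fruits:
--         placed = False
--
--         # 從左到右找第一個容量足夠且未使用的籃子 / Find the leftmost available basket with sufficient capacity
--         for i in range(len(baskets)):
--             if not used_baskets[i] and baskets[i] >= fruit_quantity: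
--                 # 將水果放入這個籃子 / Place the fruit into this basket
--                 used_baskets[i] = True
--                 placed = True
--                 break
--
--         # 如果沒有找到合適的籃子，計數未放置的水果 / If no suitable basket found, count as unplaced
--         if not placed:
--             unplaced_count += 1
--
--     return unplaced_count
-- ===== SOURCE B (Python) =====
-- from typing import List, Optional
--
-- # Segment tree (recursive pairs) over basket capacities; each node stores the max
-- # remaining capacity, allocation descends to the leftmost sufficient leaf.
--
-- def _mx(a, b):
--     if a is None:
--         return b
--     if b is None:
--         return a
--     return a if a >= b else b
--
-- def _top(t):
--     return t[1]
--
-- def _build(vals):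
--     if len(vals) == 1:
--         return ('L', vals[0])
--     mid = len(vals) // 2
--     l = _build(vals[:mid])
--     r = _build(vals[mid:])
--     return ('N', _mx(_top(l), _top(r)), l, r)
--
-- def _alloc(t, q):
--     # leftmost leaf with capacity >= q: mark it used; None if no such leaf
--     if t[0] == 'L':
--         if t[1] is not None and t[1] >= q:
--             return ('L', None)
--         return None
--     _, m, l, r = t
--     if m is None or m < q:
--         return None
--     nl = _alloc(l, q)
--     if nl is not None:
--         return ('N', _mx(_top(nl), _top(r)), nl, r)
--     nr = _alloc(r, q)
--     if nr is not None:
--         return ('N', _mx(_top(l), _top(nr)), l, nr)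
--     return None
--
-- def basketsToRemove(fruits: List[int], baskets: List[int]) -> int:
--     if not baskets:
--         return len(fruits)
--     t = _build(baskets)
--     unplaced = 0
--     for q in fruits:
--         nt = _alloc(t, q)
--         if nt is None:
--             unplaced += 1
--         else:
--             t = nt
--     return unplaced
-- ===== Notes on version B (the rewrite author's own statement) =====
-- stated objective: faster
-- what changed: Replaces the per-fruit linear scan over a used-flag array with a max segment tree over basket capacities, allocating by descending to the leftmost sufficient leaf.
import Mathlib
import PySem

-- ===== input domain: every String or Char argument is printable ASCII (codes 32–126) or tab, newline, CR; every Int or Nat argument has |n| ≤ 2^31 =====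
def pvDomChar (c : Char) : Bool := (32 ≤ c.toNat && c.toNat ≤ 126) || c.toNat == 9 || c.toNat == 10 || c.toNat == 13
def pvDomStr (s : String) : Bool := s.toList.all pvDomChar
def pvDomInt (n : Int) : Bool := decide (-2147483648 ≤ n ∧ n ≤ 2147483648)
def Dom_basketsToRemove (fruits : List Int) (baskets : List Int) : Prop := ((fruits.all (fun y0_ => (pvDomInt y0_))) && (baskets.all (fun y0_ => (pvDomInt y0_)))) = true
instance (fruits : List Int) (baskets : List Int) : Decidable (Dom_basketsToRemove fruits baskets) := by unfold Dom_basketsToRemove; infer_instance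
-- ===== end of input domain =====

-- B replaces A's per-fruit linear scan over a used-flag array by a max segment tree
-- over basket capacities (leftmost-sufficient descent): objective = faster.

-- ===== PORT A =====
-- inner 'for i in range(len(baskets)) … break' loop of A, as structural recursion on i
def aScan (baskets : List Int) (q : Int) (used : List Bool) (i : Nat) : Option (List Bool) :=
  if i < baskets.length then
    if used.getD i true = false ∧ baskets.getD i 0 ≥ q then some (used.set i true)
    else aScan baskets q used (i + 1)
  else none
termination_by baskets.length - i

def basketsToRemove (fruits : List Int) (baskets : List Int) : Int :=
  (fruits.foldl (fun st q =>
      match aScan baskets q st.1 0 with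
      | some u => (u, st.2)
      | none => (st.1, st.2 + 1))
    (List.replicate baskets.length false, (0 : Int))).2

-- ===== PORT B =====
-- segment tree node: stored value = max remaining capacity below (none = all used)
inductive BTree where
  | leaf : Option Int → BTree
  | node : Option Int → BTree → BTree → BTree
deriving DecidableEq, Repr

-- _mx of Source B
def mxOpt : Option Int → Option Int → Option Int
  | none, b => b
  | some a, none => some a
  | some a, some b => if b ≤ a then some a else some b

-- _top of Source B
def topT : BTree → Option Int
  | .leaf o => o
  | .node m _ _ => m

-- _build of Source B (Source B never calls it on []; the [] equation is a dummy leaf)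
def buildT : List Int → BTree
  | [] => .leaf none
  | [v] => .leaf (some v)
  | v₁ :: v₂ :: rest =>
      let vs := v₁ :: v₂ :: rest
      let l := buildT (vs.take (vs.length / 2))
      let r := buildT (vs.drop (vs.length / 2))
      .node (mxOpt (topT l) (topT r)) l r
termination_by vals => vals.length
decreasing_by all_goals (simp [List.length_take, List.length_drop]; omega)

-- _alloc of Source B
def allocT (t : BTree) (q : Int) : Option BTree :=
  match t with
  | .leaf o =>
      match o with
      | some c => if q ≤ c then some (.leaf none) else none
      | none => none
  | .node m l r =>
      match m with
      | none => none
      | some mv =>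
        if mv < q then none
        else
          match allocT l q with
          | some nl => some (.node (mxOpt (topT nl) (topT r)) nl r)
          | none =>
            match allocT r q with
            | some nr => some (.node (mxOpt (topT l) (topT nr)) l nr)
            | none => none

def basketsToRemove_alt (fruits : List Int) (baskets : List Int) : Int :=
  if baskets = [] then (fruits.length : Int)
  else
    (fruits.foldl (fun st q =>
        match allocT st.1 q with
        | none => (st.1, st.2 + 1)
        | some nt => (nt, st.2))
      (buildT baskets, (0 : Int))).2

-- ===== PRECONDITION & SPEC =====
def Spec_basketsToRemove (fruits : List Int) (baskets : List Int) (out : Int) : Prop := out = basketsToRemove_alt fruits baskets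
instance (fruits : List Int) (baskets : List Int) (out : Int) : Decidable (Spec_basketsToRemove fruits baskets out) := by unfold Spec_basketsToRemove; infer_instance

-- ===== CLAIM (what is proved, stated in full; the proofs are below) =====
def Claim_equal_basketsToRemove : Prop := ∀ (fruits : List Int) (baskets : List Int), Dom_basketsToRemove fruits baskets → Spec_basketsToRemove fruits baskets (basketsToRemove fruits baskets)

-- ===== LEMMAS AND PROOFS =====

-- the list of leaf values of a tree, left to right
def leaves : BTree → List (Option Int)
  | .leaf o => [o]
  | .node _ l r => leaves l ++ leaves r

def mxList (xs : List (Option Int)) : Option Int := xs.foldr mxOpt none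

-- every node's stored value is the mx of its children's
def GoodT : BTree → Prop
  | .leaf _ => True
  | .node m l r => m = mxOpt (topT l) (topT r) ∧ GoodT l ∧ GoodT r

-- list-level specification of one allocation: blank out the first `some c` with q ≤ c
def repF (q : Int) : List (Option Int) → Option (List (Option Int))
  | [] => none
  | none :: xs => (repF q xs).map (none :: ·)
  | some c :: xs =>
      if q ≤ c then some (none :: xs) else (repF q xs).map (some c :: ·)

-- mask view of A's state: baskets with used positions blanked out
def mask : List Bool → List Int → List (Option Int)
  | u :: us, b :: bs => (if u then none else some b) :: mask us bs
  | _, _ => []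

theorem mxOpt_some (x y : Int) : mxOpt (some x) (some y) = some (max x y) := by
  simp only [mxOpt]
  split_ifs with h
  · rw [max_eq_left h]
  · rw [max_eq_right (not_le.mp h).le]

theorem mxOpt_none_right (a : Option Int) : mxOpt a none = a := by cases a <;> rfl

theorem mxOpt_assoc (a b c : Option Int) : mxOpt (mxOpt a b) c = mxOpt a (mxOpt b c) := by
  cases a with
  | none => rfl
  | some x =>
      cases b with
      | none => rfl
      | some y =>
          cases c with
          | none => rw [mxOpt_none_right, mxOpt_none_right]
          | some z => rw [mxOpt_some, mxOpt_some, mxOpt_some, mxOpt_some, max_assoc]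

theorem mxList_append (a b : List (Option Int)) :
    mxList (a ++ b) = mxOpt (mxList a) (mxList b) := by
  induction a with
  | nil => simp [mxList, mxOpt]
  | cons x xs ih => simp [mxList, List.foldr] at *; rw [ih, mxOpt_assoc]

theorem mxList_cons (x : Option Int) (t : List (Option Int)) :
    mxList (x :: t) = mxOpt x (mxList t) := rfl

theorem mxList_bound {c : Int} {xs : List (Option Int)} (h : some c ∈ xs) :
    ∃ m, mxList xs = some m ∧ c ≤ m := by
  induction xs with
  | nil => simp at h
  | cons x t ih =>
      rcases List.mem_cons.1 h with h | h
      · subst h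
        rcases ht : mxList t with _ | m
        · exact ⟨c, by rw [mxList_cons, ht]; rfl, le_refl c⟩
        · exact ⟨max c m, by rw [mxList_cons, ht, mxOpt_some], le_max_left _ _⟩
      · rcases ih h with ⟨m, hm, hc⟩
        cases x with
        | none => exact ⟨m, by rw [mxList_cons, hm]; rfl, hc⟩
        | some a =>
            exact ⟨max a m, by rw [mxList_cons, hm, mxOpt_some],
              le_trans hc (le_max_right _ _)⟩

theorem repF_eq_none_iff (q : Int) (xs : List (Option Int)) :
    repF q xs = none ↔ ∀ c : Int, some c ∈ xs → c < q := by
  induction xs with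
  | nil => simp [repF]
  | cons x t ih =>
      cases x with
      | none => simp [repF, Option.map_eq_none_iff, ih]
      | some c =>
          by_cases h : q ≤ c
          · simp only [repF, if_pos h, List.mem_cons]
            constructor
            · intro hc; cases hc
            · intro hall
              exact absurd (hall c (Or.inl rfl)) (by omega)
          · simp only [repF, if_neg h, Option.map_eq_none_iff, ih, List.mem_cons]
            constructor
            · rintro hall c' (h' | h')
              · injection h' with h'; omega
              · exact hall c' h'
            · intro hall c' h'
              exact hall c' (Or.inr (by exact_mod_cast h'))

theorem repF_append (q : Int) (a b : List (Option Int)) :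
    repF q (a ++ b) =
      match repF q a with
      | some a' => some (a' ++ b)
      | none => (repF q b).map (a ++ ·)
  := by
  induction a with
  | nil => simp [repF]
  | cons x t ih =>
      cases x with
      | none =>
          simp only [List.cons_append, repF, ih]
          cases repF q t <;> cases repF q b <;> simp
      | some c =>
          by_cases h : q ≤ c
          · simp [repF, h]
          · simp only [List.cons_append, repF, if_neg h, ih]
            cases repF q t <;> cases repF q b <;> simp

theorem top_eq_mxList {t : BTree} (h : GoodT t) : topT t = mxList (leaves t) := by
  induction t with
  | leaf o => cases o <;> rfl
  | node m l r ihl ihr =>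
      rcases h with ⟨hm, hl, hr⟩
      show m = mxList (leaves l ++ leaves r)
      rw [hm, ihl hl, ihr hr, mxList_append]

theorem alloc_spec {t : BTree} (q : Int) (h : GoodT t) :
    Option.map leaves (allocT t q) = repF q (leaves t) := by
  induction t with
  | leaf o =>
      cases o with
      | none => simp [allocT, leaves, repF]
      | some c => by_cases hc : q ≤ c <;> simp [allocT, leaves, repF, hc]
  | node m l r ihl ihr =>
      rcases h with ⟨hm, hl, hr⟩
      have hml := ihl hl
      have hmr := ihr hr
      have htop : m = mxList (leaves l ++ leaves r) := by
        rw [mxList_append, ← top_eq_mxList hl, ← top_eq_mxList hr, hm]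
      rcases hmv : m with _ | mv
      · -- all leaves used: repF is none
        have : ∀ c : Int, some c ∈ leaves l ++ leaves r → c < q := by
          intro c hc
          rcases mxList_bound hc with ⟨mm, hmm, _⟩
          rw [← htop, hmv] at hmm; cases hmm
        simp [allocT, leaves, (repF_eq_none_iff q _).2 this]
      · by_cases hlt : mv < q
        · have : ∀ c : Int, some c ∈ leaves l ++ leaves r → c < q := by
            intro c hc
            rcases mxList_bound hc with ⟨mm, hmm, hcm⟩
            rw [← htop, hmv] at hmm
            injection hmm with hmm; omega
          simp [allocT, leaves, hlt, (repF_eq_none_iff q _).2 this]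
        · rcases hal : allocT l q with _ | nl
          · rcases har : allocT r q with _ | nr
            · rw [hal] at hml; rw [har] at hmr
              simp [allocT, hlt, hal, har, leaves, repF_append, ← hml, ← hmr]
            · rw [hal] at hml; rw [har] at hmr
              simp only [allocT, hlt, hal, har, leaves,
                repF_append, ← hml, ← hmr]
              simp [leaves]
          · rw [hal] at hml
            simp only [allocT, hlt, hal, leaves, repF_append, ← hml]
            simp [leaves]

theorem alloc_good {t t' : BTree} {q : Int} (h : GoodT t) (ha : allocT t q = some t') :
    GoodT t' := by
  induction t generalizing t' with
  | leaf o =>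
      cases o with
      | none => simp [allocT] at ha
      | some c =>
          by_cases hc : q ≤ c <;> simp [allocT, hc] at ha
          subst ha; trivial
  | node m l r ihl ihr =>
      rcases h with ⟨hm, hl, hr⟩
      rcases hmv : m with _ | mv
      · simp [allocT, hmv] at ha
      · by_cases hlt : mv < q
        · simp [allocT, hmv, hlt] at ha
        · rcases hal : allocT l q with _ | nl
          · rcases har : allocT r q with _ | nr
            · simp [allocT, hmv, hlt, hal, har] at ha
            · simp [allocT, hmv, hlt, hal, har] at ha
              subst ha; exact ⟨rfl, hl, ihr hr har⟩
          · simp [allocT, hmv, hlt, hal] at ha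
            subst ha; exact ⟨rfl, ihl hl hal, hr⟩

theorem good_build (vals : List Int) : GoodT (buildT vals) := by
  induction vals using buildT.induct with
  | case1 => rw [buildT]; exact trivial
  | case2 v => rw [buildT]; exact trivial
  | case3 v₁ v₂ rest vs ih1 ih2 =>
      rw [buildT]
      exact ⟨rfl, ih1, ih2⟩

theorem leaves_build (vals : List Int) (h : vals ≠ []) :
    leaves (buildT vals) = vals.map some := by
  induction vals using buildT.induct with
  | case1 => exact absurd rfl h
  | case2 v => rw [buildT]; rfl
  | case3 v₁ v₂ rest vs ih1 ih2 =>
      have h1 : (v₁ :: v₂ :: rest).take ((v₁ :: v₂ :: rest).length / 2) ≠ [] := by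
        intro hcon
        rcases List.take_eq_nil_iff.mp hcon with h0 | h0
        · simp only [List.length_cons] at h0; omega
        · exact List.cons_ne_nil _ _ h0
      have h2 : (v₁ :: v₂ :: rest).drop ((v₁ :: v₂ :: rest).length / 2) ≠ [] := by
        intro hcon
        have h0 := List.drop_eq_nil_iff.mp hcon
        simp only [List.length_cons] at h0; omega
      rw [buildT]
      show leaves (buildT _) ++ leaves (buildT _) = _
      rw [ih1 h1, ih2 h2, ← List.map_append, List.take_append_drop]

theorem mask_length (us : List Bool) (bs : List Int) (h : us.length = bs.length) :
    (mask us bs).length = bs.length := by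
  induction us generalizing bs with
  | nil => cases bs <;> simp_all [mask]
  | cons u ut ih =>
      cases bs with
      | nil => simp at h
      | cons b bt => simp [mask]; exact ih bt (by simpa using h)

theorem mask_replicate (bs : List Int) :
    mask (List.replicate bs.length false) bs = bs.map some := by
  induction bs with
  | nil => simp [mask]
  | cons b bt ih => simp [List.replicate, mask, ih]

theorem mask_getElem (us : List Bool) (bs : List Int) (i : Nat)
    (h : us.length = bs.length) (hi : i < bs.length) :
    (mask us bs).getD i none =
      (if us.getD i true then none else some (bs.getD i 0)) := by
  induction us generalizing bs i with
  | nil => cases bs <;> simp_all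
  | cons u ut ih =>
      cases bs with
      | nil => simp at hi
      | cons b bt =>
          cases i with
          | zero => simp [mask]
          | succ j =>
              simp only [mask, List.getD_cons_succ]
              exact ih bt j (by simpa using h) (by simpa using hi)

theorem mask_set (us : List Bool) (bs : List Int) (i : Nat)
    (h : us.length = bs.length) (hi : i < bs.length) :
    mask (us.set i true) bs = (mask us bs).set i none := by
  induction us generalizing bs i with
  | nil => cases bs <;> simp_all
  | cons u ut ih =>
      cases bs with
      | nil => simp at hi
      | cons b bt =>
          cases i with
          | zero => simp [mask]
          | succ j =>
              show (if u then none else some b) :: mask (ut.set j true) bt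
                = ((if u then none else some b) :: mask ut bt).set (j + 1) none
              rw [List.set_cons_succ, ih bt j (by simpa using h) (by simpa using hi)]

theorem aScan_length {baskets : List Int} {q : Int} {used u : List Bool} {i : Nat}
    (h : aScan baskets q used i = some u) : u.length = used.length := by
  induction i using aScan.induct baskets q used with
  | case1 i hi hc =>
      rw [aScan, if_pos hi, if_pos hc] at h
      injection h with h; subst h; simp
  | case2 i hi hc ih =>
      rw [aScan, if_pos hi, if_neg hc] at h
      exact ih h
  | case3 i hi =>
      rw [aScan, if_neg hi] at h; cases h

theorem aScan_spec (baskets : List Int) (q : Int) (used : List Bool)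
    (h : used.length = baskets.length) (i : Nat) :
    Option.map (fun u => mask u baskets) (aScan baskets q used i)
      = (repF q ((mask used baskets).drop i)).map
          (((mask used baskets).take i) ++ ·) := by
  have hmlen : (mask used baskets).length = baskets.length := mask_length used baskets h
  induction i using aScan.induct baskets q used with
  | case1 i hi hc =>
      have him : i < (mask used baskets).length := by omega
      rw [aScan, if_pos hi, if_pos hc, List.drop_eq_getElem_cons him]
      have hx : (mask used baskets)[i] = some (baskets.getD i 0) := by
        rw [← List.getD_eq_getElem (mask used baskets) none him,
          mask_getElem used baskets i h hi, hc.1]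
        simp
      rw [hx]
      simp only [Option.map_some, repF, if_pos hc.2]
      rw [mask_set used baskets i h hi, List.set_eq_take_cons_drop none him]
  | case2 i hi hc ih =>
      have him : i < (mask used baskets).length := by omega
      rw [aScan, if_pos hi, if_neg hc, ih, List.drop_eq_getElem_cons him]
      have htake : (mask used baskets).take (i + 1)
          = (mask used baskets).take i ++ [(mask used baskets)[i]] := by
        rw [List.take_add_one, List.getElem?_eq_getElem him]
        rfl
      have hskip : repF q ((mask used baskets)[i] :: (mask used baskets).drop (i + 1))
          = (repF q ((mask used baskets).drop (i + 1))).map ((mask used baskets)[i] :: ·) := by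
        have hx : (mask used baskets)[i]
            = if used.getD i true then none else some (baskets.getD i 0) := by
          rw [← List.getD_eq_getElem (mask used baskets) none him,
            mask_getElem used baskets i h hi]
        rcases hu : used.getD i true with _ | _
        · -- basket i is free; the capacity test must have failed
          have hq : ¬ q ≤ baskets.getD i 0 := by
            intro hq'
            exact hc ⟨hu, hq'⟩
          rw [hx, if_neg (by rw [hu]; decide)]
          simp only [repF]
          rw [if_neg hq]
        · rw [hx, if_pos hu]
          simp only [repF]
      rw [hskip]
      cases repF q ((mask used baskets).drop (i + 1)) with
      | none => rfl
      | some v =>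
          simp only [Option.map_some, Option.some.injEq]
          rw [htake, List.append_assoc]
          rfl
  | case3 i hi =>
      have : (mask used baskets).drop i = [] := by
        apply List.drop_eq_nil_of_le
        omega
      rw [aScan, if_neg hi, this]
      simp [repF]

-- one step of A agrees with one step of B, through the mask/leaves view
theorem step_equiv (baskets : List Int) (q : Int) (used : List Bool) (t : BTree)
    (hlen : used.length = baskets.length) (hmask : mask used baskets = leaves t)
    (hg : GoodT t) :
    Option.map (fun u => mask u baskets) (aScan baskets q used 0)
      = Option.map leaves (allocT t q) := by
  rw [alloc_spec q hg, ← hmask, aScan_spec baskets q used hlen 0]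
  simp only [List.drop_zero, List.take_zero, List.nil_append]
  cases repF q (mask used baskets) <;> rfl

theorem fold_equiv (baskets : List Int) (fruits : List Int) (used : List Bool)
    (t : BTree) (cnt : Int) (hlen : used.length = baskets.length)
    (hmask : mask used baskets = leaves t) (hg : GoodT t) :
    (fruits.foldl (fun st q =>
        match aScan baskets q st.1 0 with
        | some u => (u, st.2)
        | none => (st.1, st.2 + 1)) (used, cnt)).2
      = (fruits.foldl (fun st q =>
          match allocT st.1 q with
          | none => (st.1, st.2 + 1)
          | some nt => (nt, st.2)) (t, cnt)).2 := by
  induction fruits generalizing used t cnt with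
  | nil => rfl
  | cons q rest ih =>
      simp only [List.foldl_cons]
      have hstep := step_equiv baskets q used t hlen hmask hg
      rcases ha : aScan baskets q used 0 with _ | u
      · rw [ha] at hstep
        rcases hb : allocT t q with _ | nt
        · exact ih used t (cnt + 1) hlen hmask hg
        · rw [hb] at hstep; simp at hstep
      · rw [ha] at hstep
        rcases hb : allocT t q with _ | nt
        · rw [hb] at hstep; simp at hstep
        · rw [hb] at hstep
          simp only [Option.map_some, Option.some.injEq] at hstep
          exact ih u nt cnt (by rw [aScan_length ha]; exact hlen) hstep
            (alloc_good hg hb)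

theorem empty_baskets (fruits : List Int) (used : List Bool) (cnt : Int) :
    (fruits.foldl (fun st q =>
        match aScan ([] : List Int) q st.1 0 with
        | some u => (u, st.2)
        | none => (st.1, st.2 + 1)) (used, cnt)).2 = cnt + fruits.length := by
  induction fruits generalizing cnt with
  | nil => simp
  | cons q rest ih =>
      have h0 : aScan ([] : List Int) q used 0 = none := by
        rw [aScan]; simp
      simp only [List.foldl_cons, h0, ih, List.length_cons]
      push_cast
      ring

-- ===== VERDICT (by name: the statement is the Claim_ definition above) =====
theorem basketsToRemove_spec : Claim_equal_basketsToRemove := by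
  intro fruits baskets _
  show basketsToRemove fruits baskets = basketsToRemove_alt fruits baskets
  unfold basketsToRemove basketsToRemove_alt
  by_cases hb : baskets = []
  · subst hb
    rw [List.length_nil, List.replicate_zero, empty_baskets]
    split_ifs with hif
    · omega
    · exact absurd rfl hif
  · rw [if_neg hb]
    exact fold_equiv baskets fruits (List.replicate baskets.length false)
      (buildT baskets) 0 (by simp)
      (by rw [mask_replicate, leaves_build baskets hb]) (good_build baskets)
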